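-- pv_equiv track=rewrite | github.com/sjrusso8/csv-diff | csv_diff/to_sql.py | diff_alter_drop
-- ===== SOURCE A (Python) =====
-- def diff_alter_drop(values, table):
--     sql = []
--     seperater = ""
--
--     sql.append(f'ALTER TABLE {table}')
--
--     if len(values) > 1:
--         seperater = ","
--
--     for i, v in enumerate(values):
--         if i == len(values) - 1:
--             seperater = ";"
--
--         sql.append(f'DROP COLUMN IF EXISTS {v}' + seperater)
--
--     return ' '.join([v for v in sql])
-- ===== SOURCE B (Python) =====
-- def diff_alter_drop(values, table):
--     head = f'ALTER TABLE {table}'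
--     if not values:
--         return head
--     body = ', '.join(f'DROP COLUMN IF EXISTS {v}' for v in values)
--     return f'{head} {body};'
-- ===== Notes on version B (the rewrite author's own statement) =====
-- stated objective: simpler
-- what changed: Replaces A's mutable-separator/enumerate last-index bookkeeping with an infix ', '.join over the clauses plus a single ';' terminator, with an early return for the empty list.
import Mathlib
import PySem

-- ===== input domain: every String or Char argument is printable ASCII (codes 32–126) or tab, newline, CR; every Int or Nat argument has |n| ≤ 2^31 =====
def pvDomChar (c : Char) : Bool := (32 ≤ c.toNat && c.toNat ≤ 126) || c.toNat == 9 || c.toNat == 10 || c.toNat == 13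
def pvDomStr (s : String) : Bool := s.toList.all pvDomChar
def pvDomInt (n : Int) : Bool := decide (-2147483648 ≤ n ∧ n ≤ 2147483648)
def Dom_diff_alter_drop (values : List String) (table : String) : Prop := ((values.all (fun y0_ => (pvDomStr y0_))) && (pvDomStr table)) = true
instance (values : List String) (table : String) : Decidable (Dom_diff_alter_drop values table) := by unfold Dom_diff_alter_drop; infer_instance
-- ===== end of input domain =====

-- ===== PORT A =====
-- B replaces A's mutable-separator / enumerate last-index bookkeeping with an infix ", ".join
-- of the clauses plus a single ";" terminator (objective: simpler). Return value only; no mutation.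
def diff_alter_drop (values : List String) (table : String) : String :=
  let sql : List String := []
  let seperater : String := ""
  let sql := sql ++ ["ALTER TABLE " ++ table]
  let seperater := if values.length > 1 then "," else seperater
  let st :=
    (PySem.List.enumerate values).foldl
      (fun (st : List String × String) iv =>
        let sep := if iv.1 = (values.length : Int) - 1 then ";" else st.2
        (st.1 ++ ["DROP COLUMN IF EXISTS " ++ iv.2 ++ sep], sep))
      (sql, seperater)
  PySem.Str.join " " st.1

-- ===== PORT B =====
def diff_alter_drop_alt (values : List String) (table : String) : String :=
  let head := "ALTER TABLE " ++ table
  if values.isEmpty then head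
  else
    let body := PySem.Str.join ", " (values.map (fun v => "DROP COLUMN IF EXISTS " ++ v))
    head ++ " " ++ body ++ ";"

-- ===== PRECONDITION & SPEC =====
def Spec_diff_alter_drop (values : List String) (table : String) (out : String) : Prop := out = diff_alter_drop_alt values table
instance (values : List String) (table : String) (out : String) : Decidable (Spec_diff_alter_drop values table out) := by unfold Spec_diff_alter_drop; infer_instance

-- ===== CLAIM (what is proved, stated in full; the proofs are below) =====
def Claim_equal_diff_alter_drop : Prop := ∀ (values : List String) (table : String), Dom_diff_alter_drop values table → Spec_diff_alter_drop values table (diff_alter_drop values table)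

-- ===== LEMMAS AND PROOFS =====

-- The clause builder shared by the statements about A's loop.
def pvClause (v : String) : String := "DROP COLUMN IF EXISTS " ++ v

-- A's loop step, abstracted for the lemmas (N = values.length).
def pvStepA (N : Int) (st : List String × String) (iv : Int × String) : List String × String :=
  let sep := if iv.1 = N - 1 then ";" else st.2
  (st.1 ++ [pvClause iv.2 ++ sep], sep)

-- While the index stays below N-1, A's separator never changes and each clause gets it appended.
theorem foldA_front (N : Int) (init : List String) (s : Int) (sql0 : List String) (sep0 : String)
    (h : s + init.length ≤ N - 1) :
    (PySem.List.enumerate init s).foldl (pvStepA N) (sql0, sep0)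
      = (sql0 ++ init.map (fun v => pvClause v ++ sep0), sep0) := by
  induction init generalizing s sql0 with
  | nil => simp [PySem.List.enumerate]
  | cons x xs ih =>
    have hne : s ≠ N - 1 := by
      simp only [List.length_cons] at h; push_cast at h; omega
    rw [PySem.List.enumerate_cons, List.foldl_cons]
    have h' : (s + 1) + (xs.length : Int) ≤ N - 1 := by
      simp only [List.length_cons] at h; push_cast at h ⊢; omega
    rw [show pvStepA N (sql0, sep0) (s, x) = (sql0 ++ [pvClause x ++ sep0], sep0) by
          simp [pvStepA, hne]]
    rw [ih (s + 1) (sql0 ++ [pvClause x ++ sep0]) h']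
    simp

-- join over a head plus a list ending in a fixed element: peel the head.
theorem join_cons_append_singleton (sep h y : List Char) (xs : List (List Char)) :
    PySem.Chars.join sep (h :: (xs ++ [y])) = h ++ sep ++ PySem.Chars.join sep (xs ++ [y]) := by
  cases xs with
  | nil => rw [List.nil_append, PySem.Chars.join_cons_cons]
  | cons a t => rw [List.cons_append, PySem.Chars.join_cons_cons]

-- Joining comma-suffixed clauses with " " equals joining the bare clauses with ", " (then ";").
theorem join_comma (init : List (List Char)) (lastv : List Char) :
    PySem.Chars.join " ".toList (init.map (fun p => p ++ ",".toList) ++ [lastv ++ ";".toList])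
      = PySem.Chars.join ", ".toList (init ++ [lastv]) ++ ";".toList := by
  induction init with
  | nil => simp [PySem.Chars.join_singleton]
  | cons a t ih =>
    rw [List.map_cons, List.cons_append, join_cons_append_singleton, ih,
        List.cons_append, join_cons_append_singleton]
    simp only [List.append_assoc]
    rw [show (",".toList:List Char) ++ (" ".toList ++ (PySem.Chars.join ", ".toList (t ++ [lastv]) ++ ";".toList))
          = ", ".toList ++ (PySem.Chars.join ", ".toList (t ++ [lastv]) ++ ";".toList) from by
        rw [← List.append_assoc]
        have hcs : (",".toList ++ " ".toList : List Char) = ", ".toList := by decide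
        rw [hcs]]

-- ===== VERDICT (by name: the statement is the Claim_ definition above) =====
theorem diff_alter_drop_spec : Claim_equal_diff_alter_drop := by
  intro values table _
  show diff_alter_drop values table = diff_alter_drop_alt values table
  rcases List.eq_nil_or_concat values with rfl | ⟨init, lastv, rfl⟩
  · apply String.toList_inj.mp
    simp [diff_alter_drop, diff_alter_drop_alt, PySem.List.enumerate,
      PySem.Str.join, PySem.Chars.join_singleton]
  · simp only [List.concat_eq_append]
    unfold diff_alter_drop diff_alter_drop_alt
    simp only [List.append_eq_nil_iff, reduceCtorEq,
      and_false, not_false_eq_true, if_neg, List.isEmpty_iff, List.nil_append]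
    set N : Int := ((init ++ [lastv]).length : Int) with hN
    set sep0 : String := if (init ++ [lastv]).length > 1 then "," else "" with hsep0
    have hstep : (fun (st : List String × String) (iv : Int × String) =>
        ((st.1 ++ ["DROP COLUMN IF EXISTS " ++ iv.2 ++ (if iv.1 = N - 1 then ";" else st.2)]),
         (if iv.1 = N - 1 then ";" else st.2))) = pvStepA N := by
      funext st iv; simp [pvStepA, pvClause]
    rw [hstep, PySem.List.enumerate_append, List.foldl_append]
    rw [foldA_front N init 0 ["ALTER TABLE " ++ table] sep0 (by simp [hN])]
    have hlastidx : ((0:Int) + (init.length : Int)) = N - 1 := by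
      simp only [hN, List.length_append, List.length_singleton]; push_cast; ring
    rw [show PySem.List.enumerate [lastv] ((0:Int) + init.length) = [(((0:Int) + init.length), lastv)] by
      simp [PySem.List.enumerate]]
    rw [List.foldl_cons, List.foldl_nil]
    simp only [pvStepA, hlastidx, if_true]
    -- both sides are now explicit joins; compare as character lists
    apply String.toList_inj.mp
    rw [PySem.Str.toList_join]
    simp only [List.map_append, List.map_cons, List.map_map, List.map_nil,
      List.cons_append, List.nil_append, String.toList_append, PySem.Str.toList_join]
    rcases List.eq_nil_or_concat init with rfl | ⟨i0, iv0, hinit⟩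
    · simp only [List.map_nil, List.nil_append]
      rw [PySem.Chars.join_cons_cons, PySem.Chars.join_singleton, PySem.Chars.join_singleton]
      simp [pvClause]
    · have hlen : (init ++ [lastv]).length > 1 := by
        subst hinit; simp only [List.concat_eq_append]; simp
      have hsep : sep0 = "," := by rw [hsep0, if_pos hlen]
      rw [hsep]
      have hmap : init.map ((fun s => s.toList) ∘ fun v => pvClause v ++ ",")
          = (init.map (fun v => (pvClause v).toList)).map (fun p => p ++ ",".toList) := by
        rw [List.map_map]; apply List.map_congr_left; intro v _
        simp [String.toList_append]
      rw [join_cons_append_singleton]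
      rw [show ((fun s => String.toList s) ∘ fun v => pvClause v ++ ",") = ((fun s => s.toList) ∘ fun v => pvClause v ++ ",") from rfl] 
      rw [hmap]
      rw [join_comma]
      simp [pvClause, Function.comp_def]
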